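-- pv_equiv track=rewrite | github.com/Andrew-Duna/Python-Basics | lesson-1/lesson_4/exercise_6.py | repeating_element
-- ===== SOURCE A (Python) =====
-- from itertools import count, cycle
--
-- def repeating_element(list):
--     cound = 1
--     for i in cycle(list):
--         if cound > (len(list) * 2):
--             break
--         else:
--             yield i
--             cound += 1
-- ===== SOURCE B (Python) =====
-- def repeating_element(list):
--     for _ in range(2):
--         for i in list:
--             yield i
-- ===== Notes on version B (the rewrite author's own statement) =====
-- stated objective: simpler
-- what changed: Replaces the infinite itertools.cycle iterator with a manual counter, comparison and break by two plain passes over the list (for _ in range(2): for i in list: yield i).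
import Mathlib
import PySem

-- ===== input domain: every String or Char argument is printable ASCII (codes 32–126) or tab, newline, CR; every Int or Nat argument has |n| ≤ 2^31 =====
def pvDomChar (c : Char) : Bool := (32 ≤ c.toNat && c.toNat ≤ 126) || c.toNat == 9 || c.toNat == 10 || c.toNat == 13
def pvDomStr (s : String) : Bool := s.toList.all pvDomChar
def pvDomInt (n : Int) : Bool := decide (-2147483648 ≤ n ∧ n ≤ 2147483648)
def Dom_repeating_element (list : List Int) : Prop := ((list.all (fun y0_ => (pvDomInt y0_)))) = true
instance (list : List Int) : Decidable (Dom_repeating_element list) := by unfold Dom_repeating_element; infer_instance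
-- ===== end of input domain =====

-- B replaces the cycle iterator + counter + break of A by two plain passes over the list (simpler decomposition).
-- Both are generators; the proof is about the yielded sequence as a list.

-- ===== PORT A =====
-- cycle(list) is modelled step for step: 'rest' is what remains of the current pass;
-- when it is exhausted, cycle restarts from the full list (or stops if the list is empty,
-- as cycle([]) yields nothing). The fuel counts the remaining yields, i.e. the loop runs
-- while cound ≤ 2*len(list): fuel = 2*len(list) initially, one yield per step.
def repeating_element_cyc (full : List Int) : Nat → List Int → List Int
  | 0, _ => []
  | Nat.succ f, x :: rest => x :: repeating_element_cyc full f rest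
  | Nat.succ f, [] =>
      match full with
      | [] => []
      | y :: ys => y :: repeating_element_cyc full f ys

def repeating_element (list : List Int) : List Int :=
  repeating_element_cyc list (2 * list.length) list

-- ===== PORT B =====
def repeating_element_alt (list : List Int) : List Int :=
  (List.range 2).foldl (fun acc _ => acc ++ list) []

-- ===== PRECONDITION & SPEC =====
def Spec_repeating_element (list : List Int) (out : List Int) : Prop := out = repeating_element_alt list
instance (list : List Int) (out : List Int) : Decidable (Spec_repeating_element list out) := by unfold Spec_repeating_element; infer_instance

-- ===== CLAIM (what is proved, stated in full; the proofs are below) =====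
def Claim_equal_repeating_element : Prop := ∀ (list : List Int), Dom_repeating_element list → Spec_repeating_element list (repeating_element list)

-- ===== LEMMAS AND PROOFS =====

-- Consuming the current pass: with enough fuel, cyc first emits 'rest', then continues from an empty pass.
theorem repeating_element_cyc_pass (full : List Int) :
    ∀ (rest : List Int) (m : Nat),
      repeating_element_cyc full (rest.length + m) rest = rest ++ repeating_element_cyc full m [] := by
  intro rest
  induction rest with
  | nil => intro m; simp
  | cons x xs ih =>
      intro m
      simpa [repeating_element_cyc, Nat.succ_add] using congrArg (x :: ·) (ih m)

-- Restarting on a nonempty list: one full pass is emitted before the fuel drops by its length.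
theorem repeating_element_cyc_restart (y : Int) (ys : List Int) (m : Nat) :
    repeating_element_cyc (y :: ys) ((y :: ys).length + m) [] =
      (y :: ys) ++ repeating_element_cyc (y :: ys) m [] := by
  have h := repeating_element_cyc_pass (y :: ys) ys m
  simp only [List.length_cons, Nat.succ_add]
  simpa [repeating_element_cyc] using congrArg (y :: ·) h

theorem repeating_element_eq_double (list : List Int) :
    repeating_element list = list ++ list := by
  cases list with
  | nil => rfl
  | cons y ys =>
      unfold repeating_element
      have hlen : 2 * (y :: ys).length = (y :: ys).length + ((y :: ys).length + 0) := by
        omega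
      rw [hlen, repeating_element_cyc_pass, repeating_element_cyc_restart]
      simp [repeating_element_cyc]

theorem repeating_element_alt_eq_double (list : List Int) :
    repeating_element_alt list = list ++ list := by
  simp [repeating_element_alt, List.range_succ]

-- ===== VERDICT (by name: the statement is the Claim_ definition above) =====
theorem repeating_element_spec : Claim_equal_repeating_element := by
  intro list _
  unfold Spec_repeating_element
  rw [repeating_element_eq_double, repeating_element_alt_eq_double]
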